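-- pv_equiv track=rewrite | github.com/mehranion/my-start-python-code | naro_somaye.py | tartib
-- ===== SOURCE A (Python) =====
-- def tartib(jam):
--     jam = jam.replace("+","")
--     coun1=0
--     coun2=0
--     coun3=0
--     for i in range(len(jam)):
--         if jam[i] == "1":
--             coun1+=1
--         elif jam[i] == "2":
--             coun2+=1
--         elif jam[i] == "3":
--             coun3+=1
--     jam= coun1*"1" + coun2*"2" + coun3*"3"
--     jam = jam.replace("","+")
--     jam = jam[1:-1]
--     return jam
-- ===== SOURCE B (Python) =====
-- def tartib(jam):
--     digits = sorted(ch for ch in jam if ch in ("1", "2", "3"))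
--     return "+".join(digits)
-- ===== Notes on version B (the rewrite author's own statement) =====
-- stated objective: simpler
-- what changed: Replaces the three manual counters, string reconstruction and the replace("","+")/slice separator trick with a single filter of the digits 1-3, a comparison sort, and '+'.join.
import Mathlib
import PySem

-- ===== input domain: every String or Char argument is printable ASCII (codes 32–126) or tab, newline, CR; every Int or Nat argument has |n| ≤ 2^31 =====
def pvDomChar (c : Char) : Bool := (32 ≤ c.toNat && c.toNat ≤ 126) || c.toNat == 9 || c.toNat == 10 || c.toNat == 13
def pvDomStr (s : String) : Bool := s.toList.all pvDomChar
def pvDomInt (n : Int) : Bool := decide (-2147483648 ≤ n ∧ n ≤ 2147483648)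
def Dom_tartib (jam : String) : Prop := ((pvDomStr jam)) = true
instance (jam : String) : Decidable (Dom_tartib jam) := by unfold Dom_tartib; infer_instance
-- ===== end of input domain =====

-- B replaces A's three manual counters, string reconstruction and replace("","+")/slice separator trick by filter + sort + '+'.join (simpler).

-- ===== PORT A =====
def tartib (jam : String) : String :=
  let jam1 : List Char := PySem.Chars.replace jam.toList ['+'] []
  let s := (PySem.List.pyRange 0 (PySem.List.len jam1)).foldl
    (fun (s : Int × Int × Int) i =>
      if PySem.List.pyGetD jam1 i ' ' = '1' then (s.1 + 1, s.2.1, s.2.2)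
      else if PySem.List.pyGetD jam1 i ' ' = '2' then (s.1, s.2.1 + 1, s.2.2)
      else if PySem.List.pyGetD jam1 i ' ' = '3' then (s.1, s.2.1, s.2.2 + 1)
      else s) (0, 0, 0)
  let jam2 := PySem.List.pyRepeat ['1'] s.1 ++ PySem.List.pyRepeat ['2'] s.2.1 ++
    PySem.List.pyRepeat ['3'] s.2.2
  let jam3 := PySem.Chars.replace jam2 [] ['+']
  String.ofList (PySem.List.slice jam3 (some 1) (some (-1)))

-- ===== PORT B =====
def tartib_alt (jam : String) : String :=
  let digits := PySem.List.sorted (jam.toList.filter fun c => c == '1' || c == '2' || c == '3')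
    (fun c => c)
  String.ofList (PySem.Chars.join ['+'] (digits.map fun c => [c]))

-- ===== PRECONDITION & SPEC =====
def Spec_tartib (jam : String) (out : String) : Prop := out = tartib_alt jam
instance (jam : String) (out : String) : Decidable (Spec_tartib jam out) := by
  unfold Spec_tartib; infer_instance

-- ===== CLAIM =====
def Claim_equal_tartib : Prop := ∀ (jam : String), Dom_tartib jam → Spec_tartib jam (tartib jam)

-- ===== LEMMAS AND PROOFS =====

-- A's first replace: removing "+" is filtering it out
theorem replace_go_plus (fuel : Nat) : ∀ (l acc : List Char), l.length ≤ fuel →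
    PySem.Chars.replace.go ['+'] [] fuel l acc
      = acc.reverse ++ l.filter (fun c => !(c == '+')) := by
  induction fuel with
  | zero =>
    intro l acc h
    have hl : l = [] := List.eq_nil_of_length_eq_zero (Nat.le_zero.mp h)
    subst hl; simp [PySem.Chars.replace.go]
  | succ n ih =>
    intro l acc h
    cases l with
    | nil => simp [PySem.Chars.replace.go]
    | cons c t =>
      have ht : t.length ≤ n := by simpa using Nat.le_of_succ_le_succ (by simpa using h)
      by_cases hc : c = '+'
      · subst hc
        simp only [PySem.Chars.replace.go]
        rw [if_pos (by simp [List.isPrefixOf])]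
        simpa using ih t acc ht
      · have hpre : (['+'].isPrefixOf (c :: t)) = false := by
          simp [List.isPrefixOf]
          intro h'; exact absurd h'.symm hc
        simp only [PySem.Chars.replace.go]
        rw [if_neg (by simp [hpre])]
        rw [ih t (c :: acc) ht]
        simp [hc]

theorem replace_plus_filter (cs : List Char) :
    PySem.Chars.replace cs ['+'] [] = cs.filter (fun c => !(c == '+')) := by
  unfold PySem.Chars.replace
  rw [if_neg (by decide)]
  simpa using replace_go_plus cs.length cs [] le_rfl

-- A's counting loop over a plain list computes the three digit counts
theorem loop_counts (l : List Char) :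
    l.foldl (fun (s : Int × Int × Int) c =>
      if c = '1' then (s.1 + 1, s.2.1, s.2.2)
      else if c = '2' then (s.1, s.2.1 + 1, s.2.2)
      else if c = '3' then (s.1, s.2.1, s.2.2 + 1)
      else s) (0, 0, 0)
    = ((l.count '1' : Int), (l.count '2' : Int), (l.count '3' : Int)) := by
  have hfun : (fun (s : Int × Int × Int) c =>
      if c = '1' then (s.1 + 1, s.2.1, s.2.2)
      else if c = '2' then (s.1, s.2.1 + 1, s.2.2)
      else if c = '3' then (s.1, s.2.1, s.2.2 + 1)
      else s)
      = (fun (s : Int × Int × Int) c =>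
        ((fun (a : Int) (c : Char) => if c = '1' then a + 1 else a) s.1 c,
         (fun (t : Int × Int) (c : Char) =>
           ((fun (a : Int) (c : Char) => if c = '2' then a + 1 else a) t.1 c,
            (fun (a : Int) (c : Char) => if c = '3' then a + 1 else a) t.2 c)) s.2 c)) := by
    funext s c
    by_cases h1 : c = '1'
    · subst h1; simp
    · by_cases h2 : c = '2'
      · subst h2; simp
      · by_cases h3 : c = '3'
        · subst h3; simp
        · simp [h1, h2, h3]
  rw [hfun]
  rw [PySem.List.foldl_prod_mk
      (f := fun (a : Int) (c : Char) => if c = '1' then a + 1 else a)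
      (g := fun (t : Int × Int) (c : Char) =>
        ((fun (a : Int) (c : Char) => if c = '2' then a + 1 else a) t.1 c,
         (fun (a : Int) (c : Char) => if c = '3' then a + 1 else a) t.2 c))]
  rw [PySem.List.foldl_prod_mk
      (f := fun (a : Int) (c : Char) => if c = '2' then a + 1 else a)
      (g := fun (a : Int) (c : Char) => if c = '3' then a + 1 else a)]
  rw [PySem.List.foldl_ite_add_one, PySem.List.foldl_ite_add_one, PySem.List.foldl_ite_add_one]
  have hc : ∀ d : Char, List.countP (fun x => decide (x = d)) l = l.count d := by
    intro d
    rw [List.count_eq_countP]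
    exact List.countP_congr (fun x _ => by simp)
  rw [hc '1', hc '2', hc '3']
  simp

-- the index loop over range(len(l)) is the loop over l
theorem loop_counts_range (l : List Char) :
    (PySem.List.pyRange 0 (PySem.List.len l)).foldl
      (fun (s : Int × Int × Int) i =>
        if PySem.List.pyGetD l i ' ' = '1' then (s.1 + 1, s.2.1, s.2.2)
        else if PySem.List.pyGetD l i ' ' = '2' then (s.1, s.2.1 + 1, s.2.2)
        else if PySem.List.pyGetD l i ' ' = '3' then (s.1, s.2.1, s.2.2 + 1)
        else s) (0, 0, 0)
    = ((l.count '1' : Int), (l.count '2' : Int), (l.count '3' : Int)) := by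
  have h := PySem.List.foldl_pyRange_pyGetD l ' '
    (fun (s : Int × Int × Int) c =>
      if c = '1' then (s.1 + 1, s.2.1, s.2.2)
      else if c = '2' then (s.1, s.2.1 + 1, s.2.2)
      else if c = '3' then (s.1, s.2.1, s.2.2 + 1)
      else s) ((0 : Int), (0 : Int), (0 : Int)) (a := 0) le_rfl
  simp only [Int.toNat_zero, List.drop_zero] at h
  exact h.trans (loop_counts l)

-- truncating the "+c₁+c₂+…+" interleaving gives the '+'-join of the singletons
theorem take_flatMap_join (cs : List Char) :
    List.take (2 * cs.length - 1) (cs.flatMap fun c => [c, '+'])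
      = PySem.Chars.join ['+'] (cs.map fun c => [c]) := by
  induction cs with
  | nil => simp [PySem.Chars.join_nil]
  | cons c t ih =>
    cases t with
    | nil => simp [PySem.Chars.join_singleton]
    | cons d t' =>
      rw [List.map_cons, List.map_cons, PySem.Chars.join_cons_cons]
      have h2 : 2 * ((c :: d :: t').length) - 1 = (2 * ((d :: t').length) - 1) + 1 + 1 := by
        simp [List.length_cons]; omega
      rw [List.flatMap_cons, h2]
      simp only [List.cons_append, List.nil_append, List.take_succ_cons]
      rw [ih]
      simp

-- length of the flatMap interleaving
theorem length_flatMap_two (cs : List Char) :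
    (cs.flatMap fun c => [c, '+']).length = 2 * cs.length := by
  induction cs with
  | nil => simp
  | cons c t ih => simp [ih]; omega

-- A's replace("","+") followed by [1:-1] is '+'-join of the singletons
theorem slice_interleave (cs : List Char) :
    PySem.List.slice (PySem.Chars.replace cs [] ['+']) (some 1) (some (-1))
      = PySem.Chars.join ['+'] (cs.map fun c => [c]) := by
  have hrep : PySem.Chars.replace cs [] ['+'] = '+' :: cs.flatMap (fun c => [c, '+']) := by
    unfold PySem.Chars.replace
    rw [if_pos (by decide)]
    rfl
  rw [hrep]
  have hlen : ('+' :: cs.flatMap (fun c => [c, '+'])).length = 2 * cs.length + 1 := by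
    simp only [List.length_cons, length_flatMap_two]
  simp only [PySem.List.slice]
  rw [show PySem.List.clampIdx ('+' :: cs.flatMap fun c => [c, '+']).length 1 = 1 from by
    simp [PySem.List.clampIdx, hlen]]
  rw [show PySem.List.clampIdx ('+' :: cs.flatMap fun c => [c, '+']).length (-1)
      = 2 * cs.length from by
    simp [PySem.List.clampIdx, hlen]
    split_ifs with h
    · omega
    · omega]
  rw [List.drop_one, List.tail_cons]
  exact take_flatMap_join cs

-- sorting the filtered digits gives the three replicate blocks
theorem sorted_filter_digits (l : List Char) :
    PySem.List.sorted (l.filter fun c => c == '1' || c == '2' || c == '3') (fun c => c)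
      = List.replicate (l.count '1') '1' ++ List.replicate (l.count '2') '2' ++
        List.replicate (l.count '3') '3' := by
  apply PySem.List.eq_of_perm_of_pairwise_le_of_injective (fun c : Char => c)
    (fun a b h => h)
  · refine (PySem.List.sorted_perm _ _ _).trans ?_
    rw [List.perm_iff_count]
    intro a
    by_cases h1 : a = '1'
    · subst h1
      rw [List.count_filter (by decide)]
      simp [List.count_append, List.count_replicate]
    · by_cases h2 : a = '2'
      · subst h2
        rw [List.count_filter (by decide)]
        simp [List.count_append, List.count_replicate]
      · by_cases h3 : a = '3'
        · subst h3
          rw [List.count_filter (by decide)]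
          simp [List.count_append, List.count_replicate]
        · have hz : List.count a (l.filter fun c => c == '1' || c == '2' || c == '3') = 0 := by
            rw [List.count_eq_zero]
            intro hmem
            have := (List.mem_filter.mp hmem).2
            simp [beq_iff_eq] at this
            rcases this with (h | h) | h
            · exact h1 h
            · exact h2 h
            · exact h3 h
          rw [hz]
          have h1' : ¬('1' = a) := fun hh => h1 hh.symm
          have h2' : ¬('2' = a) := fun hh => h2 hh.symm
          have h3' : ¬('3' = a) := fun hh => h3 hh.symm
          simp [List.count_append, List.count_replicate, h1', h2', h3']
  · exact PySem.List.sorted_pairwise _ _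
  · rw [List.pairwise_append]
    refine ⟨?_, List.Pairwise.imp (fun h => h) (List.pairwise_replicate.mpr (Or.inr le_rfl)), ?_⟩
    · rw [List.pairwise_append]
      refine ⟨List.Pairwise.imp (fun h => h) (List.pairwise_replicate.mpr (Or.inr le_rfl)),
        List.Pairwise.imp (fun h => h) (List.pairwise_replicate.mpr (Or.inr le_rfl)), ?_⟩
      intro a ha b hb
      rw [List.eq_of_mem_replicate ha, List.eq_of_mem_replicate hb]
      decide
    · intro a ha b hb
      rw [List.eq_of_mem_replicate hb]
      rcases List.mem_append.mp ha with h | h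
      · rw [List.eq_of_mem_replicate h]; decide
      · rw [List.eq_of_mem_replicate h]; decide

-- counts survive A's '+'-removal
theorem count_filter_plus (l : List Char) (d : Char) (hd : d ≠ '+') :
    (l.filter fun c => !(c == '+')).count d = l.count d :=
  List.count_filter (by simp [hd])

-- ===== VERDICT =====
theorem tartib_spec : Claim_equal_tartib := by
  intro jam _
  unfold Spec_tartib tartib tartib_alt
  simp only [replace_plus_filter, loop_counts_range, PySem.List.pyRepeat_singleton,
    Int.toNat_natCast]
  rw [count_filter_plus _ _ (by decide), count_filter_plus _ _ (by decide),
    count_filter_plus _ _ (by decide)]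
  rw [slice_interleave, sorted_filter_digits]
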